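-- pv_equiv track=rewrite | github.com/darko1002001/advent-of-code-24 | solutions/day_02/part_2.py | solve_level_variations
-- ===== SOURCE A (Python) =====
-- from itertools import pairwise
--
-- def solve_level_variations(level: list[int]) -> bool:
--     is_ok: bool = solve_level(level)
--     if is_ok:
--         return True
--     for i in range(len(level)):
--         if solve_level(sub_list(level, i)):
--             return True
--     return False
--
-- def sub_list(level: list[int], index: int):
--     return level[:index] + level[(index + 1) :]
--
-- def solve_level(level: list[int]):
--     decreasing: bool | None = None
--     for a, b in pairwise(level):
--         diff = a - b
--         if abs(diff) > 3 or diff == 0: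
--             return False
--         if decreasing == None:
--             decreasing = diff > 0
--         elif decreasing is not (diff > 0):
--             return False
--     return True
-- ===== SOURCE B (Python) =====
-- def solve_level_variations(level: list[int]) -> bool:
--     # Work on the list of consecutive differences instead of rebuilding sublists:
--     # removing element i merges the two adjacent differences (or drops an end one).
--     ds = [a - b for a, b in zip(level, level[1:])]
--     if _ok(ds):
--         return True
--     n = len(level)
--     for i in range(n):
--         if i == 0:
--             cand = ds[1:]
--         elif i == n - 1:
--             cand = ds[:n - 2]
--         else:
--             cand = ds[:i - 1] + [ds[i - 1] + ds[i]] + ds[i + 1:]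
--         if _ok(cand):
--             return True
--     return False
--
--
-- def _ok(ds: list[int]) -> bool:
--     return all(1 <= d <= 3 for d in ds) or all(-3 <= d <= -1 for d in ds)
-- ===== Notes on version B (the rewrite author's own statement) =====
-- stated objective: alternative
-- what changed: B computes the consecutive-difference list once and tests each single-element deletion by merging/dropping the two adjacent differences (with monotonicity checked as 'all diffs in [1,3] or all in [-3,-1]'), instead of A's rebuilding every deletion sublist by slicing and re-running the stateful decreasing-flag scan.
import Mathlib
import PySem

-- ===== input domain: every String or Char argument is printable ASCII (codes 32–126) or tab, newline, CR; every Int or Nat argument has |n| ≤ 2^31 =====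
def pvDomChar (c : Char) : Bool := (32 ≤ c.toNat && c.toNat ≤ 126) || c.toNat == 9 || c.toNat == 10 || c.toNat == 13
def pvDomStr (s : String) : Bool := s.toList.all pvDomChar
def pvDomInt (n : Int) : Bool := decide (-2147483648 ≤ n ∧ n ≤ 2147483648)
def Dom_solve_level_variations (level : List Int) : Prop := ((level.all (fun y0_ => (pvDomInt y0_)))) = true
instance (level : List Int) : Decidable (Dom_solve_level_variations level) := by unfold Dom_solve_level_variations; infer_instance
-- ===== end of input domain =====

-- B replaces A's rebuild-and-rescan of every deletion sublist by one pass over the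
-- consecutive-difference list, where deleting element i merges two adjacent differences
-- (objective: alternative decomposition, same asymptotic cost).


-- ===== PORT A =====
-- the 'for a, b in pairwise(level)' loop of solve_level, carrying the 'decreasing' flag
def pvA_go (dec : Option Bool) : List (Int × Int) → Bool
  | [] => true
  | (a, b) :: rest =>
    let diff := a - b
    if 3 < |diff| ∨ diff = 0 then false
    else
      match dec with
      | none => pvA_go (some (decide (diff > 0))) rest
      | some d => if d ≠ decide (diff > 0) then false else pvA_go (some d) rest

-- itertools.pairwise(level) = zip(level, level[1:]) = level.zip level.tail (exact)
def pvA_solveLevel (level : List Int) : Bool :=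
  pvA_go none (level.zip level.tail)

def pvA_subList (level : List Int) (index : Int) : List Int :=
  PySem.List.slice level none (some index) ++ PySem.List.slice level (some (index + 1)) none

def solve_level_variations (level : List Int) : Bool :=
  if pvA_solveLevel level then true
  else (PySem.List.pyRange 0 (level.length : Int) 1).any
        (fun i => pvA_solveLevel (pvA_subList level i))

-- ===== PORT B =====
def pvB_ok (ds : List Int) : Bool :=
  ds.all (fun d => decide (1 ≤ d) && decide (d ≤ 3)) ||
  ds.all (fun d => decide (-3 ≤ d) && decide (d ≤ -1))

def pvB_diffs (level : List Int) : List Int :=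
  (level.zip (PySem.List.slice level (some 1) none)).map (fun p => p.1 - p.2)

def solve_level_variations_alt (level : List Int) : Bool :=
  let ds := pvB_diffs level
  if pvB_ok ds then true
  else
    let n : Int := level.length
    (PySem.List.pyRange 0 n 1).any (fun i =>
      let cand :=
        if i = 0 then PySem.List.slice ds (some 1) none
        else if i = n - 1 then PySem.List.slice ds none (some (n - 2))
        else
          -- ds[i-1], ds[i]: indices are in range for every i this loop reaches,
          -- so pyGetD with default 0 computes exactly Python's ds[i-1] / ds[i]
          PySem.List.slice ds none (some (i - 1)) ++
          [PySem.List.pyGetD ds (i - 1) 0 + PySem.List.pyGetD ds i 0] ++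
          PySem.List.slice ds (some (i + 1)) none
      pvB_ok cand)

-- ===== PRECONDITION & SPEC =====
def Spec_solve_level_variations (level : List Int) (out : Bool) : Prop := out = solve_level_variations_alt level
instance (level : List Int) (out : Bool) : Decidable (Spec_solve_level_variations level out) := by unfold Spec_solve_level_variations; infer_instance

-- ===== CLAIM (what is proved, stated in full; the proofs are below) =====
def Claim_equal_solve_level_variations : Prop := ∀ (level : List Int), Dom_solve_level_variations level → Spec_solve_level_variations level (solve_level_variations level)

-- ===== LEMMAS AND PROOFS =====

-- recursive form of the difference list, for induction
def pvDRec : List Int → List Int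
  | a :: b :: t => (a - b) :: pvDRec (b :: t)
  | _ => []

theorem pvB_diffs_eq (l : List Int) : pvB_diffs l = pvDRec l := by
  induction l with
  | nil => rfl
  | cons a t ih =>
    cases t with
    | nil => rfl
    | cons b t' =>
      simp only [pvB_diffs, PySem.List.slice_from_one] at *
      simp only [pvDRec, List.tail_cons, List.zip_cons_cons, List.map_cons] at *
      exact congrArg _ ih

theorem pvA_go_some_true (ps : List (Int × Int)) :
    pvA_go (some true) ps = ps.all (fun p => decide (1 ≤ p.1 - p.2) && decide (p.1 - p.2 ≤ 3)) := by
  induction ps with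
  | nil => rfl
  | cons p t ih =>
    obtain ⟨a, b⟩ := p
    simp only [pvA_go, List.all_cons]
    by_cases hb : 3 < |a - b| ∨ a - b = 0
    · have hp : (decide (1 ≤ a - b) && decide (a - b ≤ 3)) = false := by
        rcases abs_cases (a - b) with ⟨he, _⟩ | ⟨he, _⟩ <;>
          simp only [Bool.and_eq_false_iff, decide_eq_false_iff_not] <;> omega
      rw [if_pos hb, hp, Bool.false_and]
    · rw [if_neg hb]
      by_cases hpos : a - b > 0
      · rw [if_neg (by simp; omega), ih]
        have hx : -3 ≤ a - b ∧ a - b ≤ 3 ∧ a - b ≠ 0 := by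
          rcases abs_cases (a - b) with ⟨he, _⟩ | ⟨he, _⟩ <;> push Not at hb <;> omega
        have hp : (decide (1 ≤ a - b) && decide (a - b ≤ 3)) = true := by
          simp only [Bool.and_eq_true, decide_eq_true_eq]; omega
        rw [hp, Bool.true_and]
      · rw [if_pos (by simp; omega)]
        have hp : (decide (1 ≤ a - b) && decide (a - b ≤ 3)) = false := by
          simp only [Bool.and_eq_false_iff, decide_eq_false_iff_not]; omega
        rw [hp, Bool.false_and]

theorem pvA_go_some_false (ps : List (Int × Int)) :
    pvA_go (some false) ps = ps.all (fun p => decide (-3 ≤ p.1 - p.2) && decide (p.1 - p.2 ≤ -1)) := by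
  induction ps with
  | nil => rfl
  | cons p t ih =>
    obtain ⟨a, b⟩ := p
    simp only [pvA_go, List.all_cons]
    by_cases hb : 3 < |a - b| ∨ a - b = 0
    · have hp : (decide (-3 ≤ a - b) && decide (a - b ≤ -1)) = false := by
        rcases abs_cases (a - b) with ⟨he, _⟩ | ⟨he, _⟩ <;>
          simp only [Bool.and_eq_false_iff, decide_eq_false_iff_not] <;> omega
      rw [if_pos hb, hp, Bool.false_and]
    · rw [if_neg hb]
      by_cases hpos : a - b > 0
      · rw [if_pos (by simp; omega)]
        have hp : (decide (-3 ≤ a - b) && decide (a - b ≤ -1)) = false := by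
          simp only [Bool.and_eq_false_iff, decide_eq_false_iff_not]; omega
        rw [hp, Bool.false_and]
      · rw [if_neg (by simp; omega), ih]
        have hx : -3 ≤ a - b ∧ a - b ≤ 3 ∧ a - b ≠ 0 := by
          rcases abs_cases (a - b) with ⟨he, _⟩ | ⟨he, _⟩ <;> push Not at hb <;> omega
        have hp : (decide (-3 ≤ a - b) && decide (a - b ≤ -1)) = true := by
          simp only [Bool.and_eq_true, decide_eq_true_eq]; omega
        rw [hp, Bool.true_and]

theorem pvA_go_none (ps : List (Int × Int)) :
    pvA_go none ps =
      (ps.all (fun p => decide (1 ≤ p.1 - p.2) && decide (p.1 - p.2 ≤ 3)) ||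
       ps.all (fun p => decide (-3 ≤ p.1 - p.2) && decide (p.1 - p.2 ≤ -1))) := by
  cases ps with
  | nil => rfl
  | cons p t =>
    obtain ⟨a, b⟩ := p
    simp only [pvA_go, List.all_cons]
    by_cases hb : 3 < |a - b| ∨ a - b = 0
    · have hpi : (decide (1 ≤ a - b) && decide (a - b ≤ 3)) = false := by
        rcases abs_cases (a - b) with ⟨he, _⟩ | ⟨he, _⟩ <;>
          simp only [Bool.and_eq_false_iff, decide_eq_false_iff_not] <;> omega
      have hpd : (decide (-3 ≤ a - b) && decide (a - b ≤ -1)) = false := by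
        rcases abs_cases (a - b) with ⟨he, _⟩ | ⟨he, _⟩ <;>
          simp only [Bool.and_eq_false_iff, decide_eq_false_iff_not] <;> omega
      rw [if_pos hb, hpi, hpd, Bool.false_and, Bool.false_and, Bool.or_self]
    · rw [if_neg hb]
      have hx : -3 ≤ a - b ∧ a - b ≤ 3 ∧ a - b ≠ 0 := by
        rcases abs_cases (a - b) with ⟨he, _⟩ | ⟨he, _⟩ <;> push Not at hb <;> omega
      by_cases hpos : a - b > 0
      · rw [show decide (a - b > 0) = true by simp; omega, pvA_go_some_true]
        have hpi : (decide (1 ≤ a - b) && decide (a - b ≤ 3)) = true := by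
          simp only [Bool.and_eq_true, decide_eq_true_eq]; omega
        have hpd : (decide (-3 ≤ a - b) && decide (a - b ≤ -1)) = false := by
          simp only [Bool.and_eq_false_iff, decide_eq_false_iff_not]; omega
        rw [hpi, hpd, Bool.true_and, Bool.false_and, Bool.or_false]
      · rw [show decide (a - b > 0) = false by simp; omega, pvA_go_some_false]
        have hpi : (decide (1 ≤ a - b) && decide (a - b ≤ 3)) = false := by
          simp only [Bool.and_eq_false_iff, decide_eq_false_iff_not]; omega
        have hpd : (decide (-3 ≤ a - b) && decide (a - b ≤ -1)) = true := by
          simp only [Bool.and_eq_true, decide_eq_true_eq]; omega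
        rw [hpi, hpd, Bool.true_and, Bool.false_and, Bool.false_or]

-- A's solve_level is B's ok-test on the difference list
theorem pvA_solveLevel_eq (l : List Int) : pvA_solveLevel l = pvB_ok (pvB_diffs l) := by
  simp only [pvA_solveLevel, pvB_ok, pvB_diffs, PySem.List.slice_from_one, pvA_go_none,
    List.all_map, Function.comp_def]

theorem pvDRec_drop_one (l : List Int) : pvDRec (l.drop 1) = (pvDRec l).drop 1 := by
  match l with
  | [] => rfl
  | [_] => rfl
  | _ :: _ :: _ => rfl

theorem pvDRec_take (l : List Int) : ∀ k : Nat, pvDRec (l.take k) = (pvDRec l).take (k - 1) := by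
  induction l with
  | nil => intro k; simp [pvDRec]
  | cons a t ih =>
    intro k
    cases t with
    | nil => cases k with
      | zero => rfl
      | succ m => cases m <;> simp [pvDRec]
    | cons b t' =>
      match k with
      | 0 => rfl
      | 1 => rfl
      | (m + 2) =>
        simp only [List.take_succ_cons, pvDRec]
        rw [show (m + 2 - 1 : Nat) = (m + 1) from rfl, List.take_succ_cons]
        exact congrArg _ (by simpa using ih (m + 1))

theorem pvDRec_middle (l : List Int) : ∀ k : Nat, 1 ≤ k → k + 1 < l.length →
    pvDRec (l.take k ++ l.drop (k + 1)) =
      (pvDRec l).take (k - 1) ++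
      [(pvDRec l).getD (k - 1) 0 + (pvDRec l).getD k 0] ++
      (pvDRec l).drop (k + 1) := by
  induction l with
  | nil => intro k h1 h2; simp at h2
  | cons a t ih =>
    intro k h1 h2
    match t, k with
    | b :: c :: t', 1 =>
      simp [pvDRec]
    | b :: t', (m + 2) =>
      have hlen : (m + 1) + 1 < (b :: t').length := by
        simp at h2 ⊢; omega
      have ht' : t' ≠ [] := by
        cases t' <;> simp at hlen ⊢
      obtain ⟨c, t'', rfl⟩ : ∃ c t'', t' = c :: t'' := by
        cases t' with
        | nil => exact absurd rfl ht'
        | cons c t'' => exact ⟨c, t'', rfl⟩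
      have key := ih (m + 1) (by omega) hlen
      simp only [List.take_succ_cons, List.drop_succ_cons, pvDRec, List.cons_append,
        List.getD_cons_succ] at key ⊢
      rw [show (m + 2 - 1 : Nat) = (m + 1) from rfl, List.take_succ_cons,
        List.getD_cons_succ]
      simp only [List.cons_append]
      exact congrArg _ (by simpa using key)

theorem pv_any_congr {α : Type} (l : List α) (f g : α → Bool)
    (h : ∀ x ∈ l, f x = g x) : l.any f = l.any g := by
  induction l with
  | nil => rfl
  | cons a t ih =>
    simp only [List.any_cons, h a (by simp), ih (fun x hx => h x (by simp [hx]))]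

-- per-deletion-index agreement: diffs of the sublist = B's candidate list
theorem pv_index_eq (l : List Int) (i : Int) (h0 : 0 ≤ i) (h1 : i < (l.length : Int)) :
    pvB_diffs (pvA_subList l i) =
      (if i = 0 then PySem.List.slice (pvB_diffs l) (some 1) none
       else if i = (l.length : Int) - 1 then
         PySem.List.slice (pvB_diffs l) none (some ((l.length : Int) - 2))
       else
         PySem.List.slice (pvB_diffs l) none (some (i - 1)) ++
         [PySem.List.pyGetD (pvB_diffs l) (i - 1) 0 + PySem.List.pyGetD (pvB_diffs l) i 0] ++
         PySem.List.slice (pvB_diffs l) (some (i + 1)) none) := by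
  obtain ⟨k, rfl⟩ : ∃ k : Nat, i = (k : Int) := ⟨i.toNat, (Int.toNat_of_nonneg h0).symm⟩
  have hk : k < l.length := by exact_mod_cast h1
  have hsub : pvA_subList l k = l.take k ++ l.drop (k + 1) := by
    unfold pvA_subList
    rw [PySem.List.slice_to_natCast]
    rw [show ((k : Int) + 1) = ((k + 1 : Nat) : Int) by push_cast; ring]
    rw [PySem.List.slice_from_natCast]
  by_cases hk0 : k = 0
  · subst hk0
    rw [if_pos (by norm_num)]
    rw [hsub, PySem.List.slice_from_one]
    simp only [List.take_zero, List.nil_append]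
    rw [pvB_diffs_eq, pvB_diffs_eq]
    rw [show (0 + 1 : Nat) = 1 from rfl, pvDRec_drop_one]
    simp [List.drop_one]
  · rw [if_neg (by exact_mod_cast hk0)]
    by_cases hklast : k = l.length - 1
    · have hn2 : 2 ≤ l.length := by omega
      rw [if_pos (by omega)]
      rw [hsub, hklast]
      have : l.drop (l.length - 1 + 1) = [] := by
        apply List.drop_eq_nil_of_le; omega
      rw [this, List.append_nil]
      rw [pvB_diffs_eq, pvB_diffs_eq, pvDRec_take]
      rw [show ((l.length : Int) - 2) = ((l.length - 2 : Nat) : Int) by push_cast [hn2]; omega]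
      rw [PySem.List.slice_to_natCast]
      congr 1
    · rw [if_neg (by omega)]
      have h1k : 1 ≤ k := by omega
      have hk1 : k + 1 < l.length := by omega
      rw [hsub, pvB_diffs_eq, pvB_diffs_eq, pvDRec_middle l k h1k hk1]
      rw [show ((k : Int) - 1) = ((k - 1 : Nat) : Int) by push_cast [h1k]; omega]
      rw [PySem.List.slice_to_natCast, PySem.List.pyGetD_natCast, PySem.List.pyGetD_natCast]
      rw [show ((k : Int) + 1) = ((k + 1 : Nat) : Int) by push_cast; ring]
      rw [PySem.List.slice_from_natCast]

-- ===== VERDICT (by name: the statement is the Claim_ definition above) =====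
theorem solve_level_variations_spec : Claim_equal_solve_level_variations := by
  intro level _
  unfold Spec_solve_level_variations
  unfold solve_level_variations solve_level_variations_alt
  rw [pvA_solveLevel_eq]
  by_cases hok : pvB_ok (pvB_diffs level) = true
  · simp [hok]
  · simp only [hok, Bool.false_eq_true, if_false]
    apply pv_any_congr
    intro i hi
    rw [PySem.List.mem_pyRange_one] at hi
    rw [pvA_solveLevel_eq, pv_index_eq level i hi.1 hi.2]
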